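-- pv_equiv track=rewrite | github.com/XWasNotDeclared/TTTN_DeBai | List/MayDoSucManh/sub_no_accent.py | do_suc_manh
-- ===== SOURCE A (Python) =====
-- def do_suc_manh(ki_list):
--     result = []
--     exploded = False
--     for k in ki_list:
--         if exploded:
--             result.append('?')
--         elif k > 100000:
--             result.append('?')
--             exploded = True
--         elif k <= 10:
--             result.append('N')
--         elif k <= 1000:
--             result.append('S')
--         elif k <= 100000:
--             result.append('SS')
--     return result
-- ===== SOURCE B (Python) =====
-- def do_suc_manh(ki_list):
--     def classify(k):
--         return 'N' if k <= 10 else 'S' if k <= 1000 else 'SS'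
--     split = next((i for i, k in enumerate(ki_list) if k > 100000), None)
--     if split is None:
--         return [classify(k) for k in ki_list]
--     return [classify(k) for k in ki_list[:split]] + ['?'] * (len(ki_list) - split)
-- ===== Notes on version B (the rewrite author's own statement) =====
-- stated objective: simpler
-- what changed: Replaces the threaded 'exploded' boolean flag with a find-the-first-overflow-index step, then builds the answer as classified prefix ++ '?'-fill, eliminating the stateful loop.
import Mathlib
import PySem

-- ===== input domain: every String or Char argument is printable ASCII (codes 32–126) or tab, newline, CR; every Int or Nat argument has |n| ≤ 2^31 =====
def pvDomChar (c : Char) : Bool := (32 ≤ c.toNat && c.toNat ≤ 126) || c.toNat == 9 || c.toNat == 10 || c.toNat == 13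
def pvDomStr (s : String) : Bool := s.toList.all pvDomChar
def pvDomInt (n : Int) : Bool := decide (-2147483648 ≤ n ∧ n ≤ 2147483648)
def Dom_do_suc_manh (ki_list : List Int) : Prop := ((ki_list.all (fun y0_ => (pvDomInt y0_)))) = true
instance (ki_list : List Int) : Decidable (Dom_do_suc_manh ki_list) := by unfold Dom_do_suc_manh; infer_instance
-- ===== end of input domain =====

-- B replaces A's threaded 'exploded' flag with find-first-overflow-index, then classified prefix ++ '?'-fill (simpler decomposition, same cost).

-- ===== PORT A =====
-- one loop step of A: state = (result so far, exploded flag)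
def pvStepA (st : List String × Bool) (k : Int) : List String × Bool :=
  if st.2 then (st.1 ++ ["?"], st.2)
  else if k > 100000 then (st.1 ++ ["?"], true)
  else if k ≤ 10 then (st.1 ++ ["N"], st.2)
  else if k ≤ 1000 then (st.1 ++ ["S"], st.2)
  else if k ≤ 100000 then (st.1 ++ ["SS"], st.2)
  else st

def do_suc_manh (ki_list : List Int) : List String :=
  (ki_list.foldl pvStepA ([], false)).1

-- ===== PORT B =====
def pvClassify (k : Int) : String := if k ≤ 10 then "N" else if k ≤ 1000 then "S" else "SS"

def do_suc_manh_alt (ki_list : List Int) : List String :=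
  match ki_list.findIdx? (fun k => decide (k > 100000)) with
  | none => ki_list.map pvClassify
  | some i => (ki_list.take i).map pvClassify ++ List.replicate (ki_list.length - i) "?"

-- ===== PRECONDITION & SPEC =====
def Spec_do_suc_manh (ki_list : List Int) (out : List String) : Prop := out = do_suc_manh_alt ki_list
instance (ki_list : List Int) (out : List String) : Decidable (Spec_do_suc_manh ki_list out) := by unfold Spec_do_suc_manh; infer_instance

-- ===== CLAIM (what is proved, stated in full; the proofs are below) =====
def Claim_equal_do_suc_manh : Prop := ∀ (ki_list : List Int), Dom_do_suc_manh ki_list → Spec_do_suc_manh ki_list (do_suc_manh ki_list)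

-- ===== LEMMAS AND PROOFS =====

-- once exploded, A appends '?' for every remaining element
theorem pvLoopTrue (l : List Int) (acc : List String) :
    (l.foldl pvStepA (acc, true)).1 = acc ++ List.replicate l.length "?" := by
  induction l generalizing acc with
  | nil => simp
  | cons k t ih =>
      simp [List.foldl_cons, pvStepA, ih, List.replicate_succ]

-- B on a non-overflow head is classify-head :: B-tail
theorem pvAltCons (k : Int) (t : List Int) (hk : ¬ k > 100000) :
    do_suc_manh_alt (k :: t) = pvClassify k :: do_suc_manh_alt t := by
  unfold do_suc_manh_alt
  rw [List.findIdx?_cons]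
  simp only [hk, decide_eq_true_eq, if_false]
  cases h : t.findIdx? (fun k => decide (k > 100000)) with
  | none => simp
  | some i => simp [List.take_succ_cons]

-- main loop invariant for the unexploded state
theorem pvLoopFalse (l : List Int) (acc : List String) :
    (l.foldl pvStepA (acc, false)).1 = acc ++ do_suc_manh_alt l := by
  induction l generalizing acc with
  | nil => simp [do_suc_manh_alt]
  | cons k t ih =>
      by_cases hk : k > 100000
      · have hA : pvStepA (acc, false) k = (acc ++ ["?"], true) := by
          simp [pvStepA, hk]
        rw [List.foldl_cons, hA, pvLoopTrue]
        unfold do_suc_manh_alt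
        rw [List.findIdx?_cons]
        simp [hk, List.replicate_succ]
      · have hA : pvStepA (acc, false) k = (acc ++ [pvClassify k], false) := by
          have h100 : k ≤ 100000 := by omega
          by_cases h10 : k ≤ 10
          · simp [pvStepA, hk, h10, pvClassify]
          · by_cases h1000 : k ≤ 1000
            · simp [pvStepA, hk, h10, h1000, pvClassify]
            · simp [pvStepA, hk, h10, h1000, h100, pvClassify]
        rw [List.foldl_cons, hA, ih, pvAltCons k t hk]
        simp

-- ===== VERDICT (by name: the statement is the Claim_ definition above) =====
theorem do_suc_manh_spec : Claim_equal_do_suc_manh := by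
  intro ki_list _
  unfold Spec_do_suc_manh do_suc_manh
  simpa using pvLoopFalse ki_list []
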